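-- pv_equiv track=rewrite | github.com/alex-skyslakova/gen-test | src/stats/java_code_quality.py | categorize_checkstyle_errors
-- ===== SOURCE A (Python) =====
-- def categorize_checkstyle_errors(errors):
--     # Define the categories and their associated checks
--     categories = {
--         "code_structure_and_design": [
--             "FileLength", "LineLength", "MethodLength", "ParameterNumber",
--             "DesignForExtension", "FinalClass", "HideUtilityClassConstructor",
--             "InterfaceIsType", "VisibilityModifier", "AvoidNestedBlocks",
--             "EmptyBlock", "NeedBraces", "LeftCurly", "RightCurly"
--         ],
--         "readability_and_conventions": [
--             "ConstantName", "LocalFinalVariableName", "LocalVariableName",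
--             "MemberName", "MethodName", "PackageName", "ParameterName",
--             "StaticVariableName", "TypeName", "EmptyForIteratorPad",
--             "GenericWhitespace", "MethodParamPad", "NoWhitespaceAfter",
--             "NoWhitespaceBefore", "OperatorWrap", "ParenPad", "TypecastParenPad",
--             "WhitespaceAfter", "WhitespaceAround", "InvalidJavadocPosition",
--             "JavadocMethod", "JavadocType", "JavadocVariable", "JavadocStyle",
--             "MissingJavadocMethod", "JavadocPackage",
--         ],
--         "code_correctness": [
--             "AvoidStarImport", "IllegalImport", "RedundantImport", "UnusedImports", "AvoidStarImport"
--             "EmptyStatement", "EqualsHashCode", "HiddenField", "IllegalInstantiation",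
--             "InnerAssignment", "MagicNumber", "MissingSwitchDefault",
--             "MultipleVariableDeclarations", "ModifierOrder", "RedundantModifier"
--         ],
--         "maintainability": [
--             "SimplifyBooleanExpression", "SimplifyBooleanReturn", "ArrayTypeStyle",
--             "FinalParameters", "TodoComment", "UpperEll"
--         ],
--         "general_setup": [
--             "NewlineAtEndOfFile", "Translation", "BeforeExecutionExclusionFileFilter",
--             "SuppressionFilter", "SuppressionXpathFilter"
--         ]
--     }
--
--     # Initialize counters for each category
--     category_counts = {category: 0 for category in categories}
--     category_counts["all"] = len(errors)
--
--     # Process each error message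
--     for error in errors:
--         # Extract the specific checkstyle rule from the error message
--         if "[" in error and "]" in error:
--             check = error.split("[")[-1].strip("]")
--             # Identify which category the check belongs to
--             for category, checks in categories.items():
--                 if check in checks:
--                     category_counts[category] += 1
--                     break
--     return category_counts
-- ===== SOURCE B (Python) =====
-- def categorize_checkstyle_errors(errors):
--     # Two staged passes: first extract the check name of every bracketed error,
--     # then count each category with a direct scan over the extracted names.
--     categories = {
--         "code_structure_and_design": [
--             "FileLength", "LineLength", "MethodLength", "ParameterNumber",
--             "DesignForExtension", "FinalClass", "HideUtilityClassConstructor",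
--             "InterfaceIsType", "VisibilityModifier", "AvoidNestedBlocks",
--             "EmptyBlock", "NeedBraces", "LeftCurly", "RightCurly"
--         ],
--         "readability_and_conventions": [
--             "ConstantName", "LocalFinalVariableName", "LocalVariableName",
--             "MemberName", "MethodName", "PackageName", "ParameterName",
--             "StaticVariableName", "TypeName", "EmptyForIteratorPad",
--             "GenericWhitespace", "MethodParamPad", "NoWhitespaceAfter",
--             "NoWhitespaceBefore", "OperatorWrap", "ParenPad", "TypecastParenPad",
--             "WhitespaceAfter", "WhitespaceAround", "InvalidJavadocPosition",
--             "JavadocMethod", "JavadocType", "JavadocVariable", "JavadocStyle",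
--             "MissingJavadocMethod", "JavadocPackage",
--         ],
--         "code_correctness": [
--             "AvoidStarImport", "IllegalImport", "RedundantImport", "UnusedImports", "AvoidStarImport"
--             "EmptyStatement", "EqualsHashCode", "HiddenField", "IllegalInstantiation",
--             "InnerAssignment", "MagicNumber", "MissingSwitchDefault",
--             "MultipleVariableDeclarations", "ModifierOrder", "RedundantModifier"
--         ],
--         "maintainability": [
--             "SimplifyBooleanExpression", "SimplifyBooleanReturn", "ArrayTypeStyle",
--             "FinalParameters", "TodoComment", "UpperEll"
--         ],
--         "general_setup": [
--             "NewlineAtEndOfFile", "Translation", "BeforeExecutionExclusionFileFilter",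
--             "SuppressionFilter", "SuppressionXpathFilter"
--         ]
--     }
--
--     checks_found = [error.split("[")[-1].strip("]")
--                     for error in errors
--                     if "[" in error and "]" in error]
--
--     counts = {category: sum(1 for c in checks_found if c in checks)
--               for category, checks in categories.items()}
--     counts["all"] = len(errors)
--     return counts
-- ===== Notes on version B (the rewrite author's own statement) =====
-- stated objective: alternative
-- what changed: Replaces A's single fold that dispatches each error through a first-match scan and increments a mutable counter dict with two staged passes: first extract the check names of all bracketed errors into a list, then build the result by counting each category's hits directly over that list.
import Mathlib
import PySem

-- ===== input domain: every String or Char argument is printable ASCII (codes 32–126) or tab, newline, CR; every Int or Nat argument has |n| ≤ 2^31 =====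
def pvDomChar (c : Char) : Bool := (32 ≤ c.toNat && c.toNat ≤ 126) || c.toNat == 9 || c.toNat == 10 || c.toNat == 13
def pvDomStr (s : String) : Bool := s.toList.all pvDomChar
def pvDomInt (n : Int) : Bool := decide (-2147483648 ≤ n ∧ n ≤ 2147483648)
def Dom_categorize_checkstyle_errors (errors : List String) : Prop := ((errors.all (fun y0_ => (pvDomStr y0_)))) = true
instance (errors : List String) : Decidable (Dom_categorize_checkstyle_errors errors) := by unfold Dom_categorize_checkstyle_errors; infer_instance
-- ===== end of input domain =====

-- B replaces A's single fold (per-error first-match category scan + counter-dict increment)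
-- with two staged passes: first extract all bracketed check names, then count each category
-- directly over that list; same result, alternative decomposition.

-- shared literal data: the categories table both Pythons contain (incl. the fused
-- "AvoidStarImportEmptyStatement" literal Python produces from the missing comma)
def pvCategories : List (String × List String) := [
  ("code_structure_and_design", ["FileLength", "LineLength", "MethodLength", "ParameterNumber", "DesignForExtension", "FinalClass", "HideUtilityClassConstructor", "InterfaceIsType", "VisibilityModifier", "AvoidNestedBlocks", "EmptyBlock", "NeedBraces", "LeftCurly", "RightCurly"]),
  ("readability_and_conventions", ["ConstantName", "LocalFinalVariableName", "LocalVariableName", "MemberName", "MethodName", "PackageName", "ParameterName", "StaticVariableName", "TypeName", "EmptyForIteratorPad", "GenericWhitespace", "MethodParamPad", "NoWhitespaceAfter", "NoWhitespaceBefore", "OperatorWrap", "ParenPad", "TypecastParenPad", "WhitespaceAfter", "WhitespaceAround", "InvalidJavadocPosition", "JavadocMethod", "JavadocType", "JavadocVariable", "JavadocStyle", "MissingJavadocMethod", "JavadocPackage"]),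
  ("code_correctness", ["AvoidStarImport", "IllegalImport", "RedundantImport", "UnusedImports", "AvoidStarImportEmptyStatement", "EqualsHashCode", "HiddenField", "IllegalInstantiation", "InnerAssignment", "MagicNumber", "MissingSwitchDefault", "MultipleVariableDeclarations", "ModifierOrder", "RedundantModifier"]),
  ("maintainability", ["SimplifyBooleanExpression", "SimplifyBooleanReturn", "ArrayTypeStyle", "FinalParameters", "TodoComment", "UpperEll"]),
  ("general_setup", ["NewlineAtEndOfFile", "Translation", "BeforeExecutionExclusionFileFilter", "SuppressionFilter", "SuppressionXpathFilter"])
]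

-- ===== PORT A =====
def pvStepA (counts : PySem.Dict String Int) (error : String) : PySem.Dict String Int :=
  if PySem.Str.isIn "[" error && PySem.Str.isIn "]" error then
    let check := PySem.Str.stripChars (((PySem.Str.split? error "[").getD []).getLastD "") "]"
    match pvCategories.find? (fun p => p.2.contains check) with
    | some p => counts.modify p.1 0 (· + 1)
    | none => counts
  else counts

def categorize_checkstyle_errors (errors : List String) : List (String × Int) :=
  let counts0 : PySem.Dict String Int :=
    (pvCategories.foldl (fun d p => d.insert p.1 (0 : Int)) PySem.Dict.empty).insert "all" (errors.length : Int)
  (errors.foldl pvStepA counts0).items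

-- ===== PORT B =====
def pvChecksFound (errors : List String) : List String :=
  (errors.filter (fun error => PySem.Str.isIn "[" error && PySem.Str.isIn "]" error)).map
    (fun error => PySem.Str.stripChars (((PySem.Str.split? error "[").getD []).getLastD "") "]")

def categorize_checkstyle_errors_alt (errors : List String) : List (String × Int) :=
  let checks_found := pvChecksFound errors
  let counts : PySem.Dict String Int :=
    pvCategories.foldl
      (fun d p => d.insert p.1 ((checks_found.countP (fun c => p.2.contains c) : Int)))
      PySem.Dict.empty
  (counts.insert "all" (errors.length : Int)).items

-- ===== PRECONDITION & SPEC =====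
def Spec_categorize_checkstyle_errors (errors : List String) (out : List (String × Int)) : Prop := out = categorize_checkstyle_errors_alt errors
instance (errors : List String) (out : List (String × Int)) : Decidable (Spec_categorize_checkstyle_errors errors out) := by unfold Spec_categorize_checkstyle_errors; infer_instance

-- ===== CLAIM (what is proved, stated in full; the proofs are below) =====
def Claim_equal_categorize_checkstyle_errors : Prop := ∀ (errors : List String), Dom_categorize_checkstyle_errors errors → Spec_categorize_checkstyle_errors errors (categorize_checkstyle_errors errors)

-- ===== LEMMAS AND PROOFS =====

-- the extracted check name and the bracket guard, shorthands for the proofs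
def pvChk (e : String) : String :=
  PySem.Str.stripChars (((PySem.Str.split? e "[").getD []).getLastD "") "]"
def pvGuard (e : String) : Bool :=
  PySem.Str.isIn "[" e && PySem.Str.isIn "]" e

-- number of errors that pass the guard and whose check lies in list l
def pvCnt (l : List String) (errors : List String) : Int :=
  (errors.countP (fun e => pvGuard e && l.contains (pvChk e)) : Int)

-- the five category check-lists, by position
def pvL (i : Nat) : List String := (pvCategories.getD i ("", [])).2

-- the dict shape A's loop maintains: the five categories then "all"
def pvMk (a b c d e f : Int) : PySem.Dict String Int :=
  PySem.Dict.mk [("code_structure_and_design", a), ("readability_and_conventions", b),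
    ("code_correctness", c), ("maintainability", d), ("general_setup", e), ("all", f)]

-- all 65 check names are pairwise distinct across the table, so the first
-- matching category of a check contained in p.2 is p itself
set_option maxRecDepth 40000 in
set_option maxHeartbeats 2000000 in
lemma pv_find_of_contains :
    ∀ p ∈ pvCategories, ∀ c ∈ p.2, pvCategories.find? (fun q => q.2.contains c) = some p := by
  decide

lemma pv_contains_false_of_find?_some {c : String} {p q : String × List String}
    (hq : q ∈ pvCategories)
    (hF : pvCategories.find? (fun r => r.2.contains c) = some p) (hne : q ≠ p) :
    q.2.contains c = false := by
  by_contra h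
  have hmem : c ∈ q.2 := by
    simpa using (Bool.not_eq_false _).mp h
  have := pv_find_of_contains q hq c hmem
  rw [hF] at this
  exact hne (Option.some.inj this).symm

lemma pvCnt_cons_pos {l : List String} {e : String} (es : List String)
    (h : (pvGuard e && l.contains (pvChk e)) = true) :
    pvCnt l (e :: es) = pvCnt l es + 1 := by
  unfold pvCnt; rw [List.countP_cons, h]; simp

lemma pvCnt_cons_neg {l : List String} {e : String} (es : List String)
    (h : (pvGuard e && l.contains (pvChk e)) = false) :
    pvCnt l (e :: es) = pvCnt l es := by
  unfold pvCnt; rw [List.countP_cons, h]; simp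

-- characterisation of A's loop on the dict shape it maintains
lemma pv_foldA_shape (errors : List String) : ∀ (a b c d e f : Int),
    errors.foldl pvStepA (pvMk a b c d e f)
      = pvMk (a + pvCnt (pvL 0) errors) (b + pvCnt (pvL 1) errors) (c + pvCnt (pvL 2) errors)
             (d + pvCnt (pvL 3) errors) (e + pvCnt (pvL 4) errors) f := by
  induction errors with
  | nil => intro a b c d e f; simp [pvCnt]
  | cons er es ih =>
    intro a b c d e f
    rw [List.foldl_cons]
    by_cases hg : pvGuard er = true
    · have hg' : (PySem.Str.isIn "[" er && PySem.Str.isIn "]" er) = true := hg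
      rcases hF : pvCategories.find? (fun q => q.2.contains (pvChk er)) with _ | p
      · have hF' := hF
        simp only [pvChk] at hF'
        have hstep : pvStepA (pvMk a b c d e f) er = pvMk a b c d e f := by
          simp only [pvStepA, hg', if_true, hF']
        have hnone := List.find?_eq_none.mp hF
        have hni : ∀ i : Nat, i < 5 → (pvGuard er && (pvL i).contains (pvChk er)) = false := by
          intro i hi
          have h5 : ¬ ((pvCategories.getD i ("", [])).2.contains (pvChk er) = true) := by
            apply hnone
            interval_cases i <;> simp [pvCategories]
          simp only [pvL, Bool.and_eq_false_iff]
          right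
          exact Bool.not_eq_true _ |>.mp h5
        rw [hstep, ih,
            pvCnt_cons_neg es (hni 0 (by omega)), pvCnt_cons_neg es (hni 1 (by omega)),
            pvCnt_cons_neg es (hni 2 (by omega)), pvCnt_cons_neg es (hni 3 (by omega)),
            pvCnt_cons_neg es (hni 4 (by omega))]
      · have hp : p ∈ pvCategories := List.mem_of_find?_eq_some hF
        have hpt : p.2.contains (pvChk er) = true := by
          simpa using List.find?_some hF
        have hF' := hF
        simp only [pvChk] at hF'
        have hstep : pvStepA (pvMk a b c d e f) er = (pvMk a b c d e f).modify p.1 0 (· + 1) := by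
          simp only [pvStepA, hg', if_true, hF']
        have hother : ∀ i : Nat, i < 5 → pvCategories.getD i ("", []) ≠ p →
            (pvGuard er && (pvL i).contains (pvChk er)) = false := by
          intro i hi hne
          have hqmem : pvCategories.getD i ("", []) ∈ pvCategories := by
            interval_cases i <;> simp [pvCategories]
          have := pv_contains_false_of_find?_some hqmem hF hne
          simp only [pvL, this, Bool.and_false]
        fin_cases hp
        · have hstep2 : pvStepA (pvMk a b c d e f) er = pvMk (a + 1) b c d e f := by
            rw [hstep]; rfl
          have hpos : (pvGuard er && (pvL 0).contains (pvChk er)) = true := by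
            rw [hg, Bool.true_and]; exact hpt
          rw [hstep2, ih,
              pvCnt_cons_pos es hpos,
              pvCnt_cons_neg es (hother 1 (by omega) (by decide)),
              pvCnt_cons_neg es (hother 2 (by omega) (by decide)),
              pvCnt_cons_neg es (hother 3 (by omega) (by decide)),
              pvCnt_cons_neg es (hother 4 (by omega) (by decide))]
          simp only [pvMk, PySem.Dict.mk.injEq, List.cons.injEq, Prod.mk.injEq, and_true,
            true_and]
          omega
        · have hstep2 : pvStepA (pvMk a b c d e f) er = pvMk a (b + 1) c d e f := by
            rw [hstep]; rfl
          have hpos : (pvGuard er && (pvL 1).contains (pvChk er)) = true := by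
            rw [hg, Bool.true_and]; exact hpt
          rw [hstep2, ih,
              pvCnt_cons_neg es (hother 0 (by omega) (by decide)),
              pvCnt_cons_pos es hpos,
              pvCnt_cons_neg es (hother 2 (by omega) (by decide)),
              pvCnt_cons_neg es (hother 3 (by omega) (by decide)),
              pvCnt_cons_neg es (hother 4 (by omega) (by decide))]
          simp only [pvMk, PySem.Dict.mk.injEq, List.cons.injEq, Prod.mk.injEq, and_true,
            true_and]
          omega
        · have hstep2 : pvStepA (pvMk a b c d e f) er = pvMk a b (c + 1) d e f := by
            rw [hstep]; rfl
          have hpos : (pvGuard er && (pvL 2).contains (pvChk er)) = true := by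
            rw [hg, Bool.true_and]; exact hpt
          rw [hstep2, ih,
              pvCnt_cons_neg es (hother 0 (by omega) (by decide)),
              pvCnt_cons_neg es (hother 1 (by omega) (by decide)),
              pvCnt_cons_pos es hpos,
              pvCnt_cons_neg es (hother 3 (by omega) (by decide)),
              pvCnt_cons_neg es (hother 4 (by omega) (by decide))]
          simp only [pvMk, PySem.Dict.mk.injEq, List.cons.injEq, Prod.mk.injEq, and_true,
            true_and]
          omega
        · have hstep2 : pvStepA (pvMk a b c d e f) er = pvMk a b c (d + 1) e f := by
            rw [hstep]; rfl
          have hpos : (pvGuard er && (pvL 3).contains (pvChk er)) = true := by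
            rw [hg, Bool.true_and]; exact hpt
          rw [hstep2, ih,
              pvCnt_cons_neg es (hother 0 (by omega) (by decide)),
              pvCnt_cons_neg es (hother 1 (by omega) (by decide)),
              pvCnt_cons_neg es (hother 2 (by omega) (by decide)),
              pvCnt_cons_pos es hpos,
              pvCnt_cons_neg es (hother 4 (by omega) (by decide))]
          simp only [pvMk, PySem.Dict.mk.injEq, List.cons.injEq, Prod.mk.injEq, and_true,
            true_and]
          omega
        · have hstep2 : pvStepA (pvMk a b c d e f) er = pvMk a b c d (e + 1) f := by
            rw [hstep]; rfl
          have hpos : (pvGuard er && (pvL 4).contains (pvChk er)) = true := by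
            rw [hg, Bool.true_and]; exact hpt
          rw [hstep2, ih,
              pvCnt_cons_neg es (hother 0 (by omega) (by decide)),
              pvCnt_cons_neg es (hother 1 (by omega) (by decide)),
              pvCnt_cons_neg es (hother 2 (by omega) (by decide)),
              pvCnt_cons_neg es (hother 3 (by omega) (by decide)),
              pvCnt_cons_pos es hpos]
          simp only [pvMk, PySem.Dict.mk.injEq, List.cons.injEq, Prod.mk.injEq, and_true,
            true_and]
          omega
    · have hg' : (PySem.Str.isIn "[" er && PySem.Str.isIn "]" er) = false := by
        simpa [pvGuard] using hg
      have hgf : pvGuard er = false := hg'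
      have hstep : pvStepA (pvMk a b c d e f) er = pvMk a b c d e f := by
        simp only [pvStepA, hg', Bool.false_eq_true, if_false]
      rw [hstep, ih,
          pvCnt_cons_neg es (by rw [hgf, Bool.false_and]),
          pvCnt_cons_neg es (by rw [hgf, Bool.false_and]),
          pvCnt_cons_neg es (by rw [hgf, Bool.false_and]),
          pvCnt_cons_neg es (by rw [hgf, Bool.false_and]),
          pvCnt_cons_neg es (by rw [hgf, Bool.false_and])]

-- B's per-category count over the extracted names equals A's guarded count over errors
lemma pv_cnt_eq (l : List String) (errors : List String) :
    pvCnt l errors = ((pvChecksFound errors).countP (fun c => l.contains c) : Int) := by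
  unfold pvCnt pvChecksFound
  rw [List.countP_map, List.countP_filter]
  congr 1
  apply List.countP_congr
  intro e _
  simp [pvChk, pvGuard, Function.comp, Bool.and_comm]

-- ===== VERDICT (by name: the statement is the Claim_ definition above) =====
theorem categorize_checkstyle_errors_spec : Claim_equal_categorize_checkstyle_errors := by
  intro errors _
  unfold Spec_categorize_checkstyle_errors
  have hA : categorize_checkstyle_errors errors
      = (errors.foldl pvStepA (pvMk 0 0 0 0 0 (errors.length : Int))).items := rfl
  have hB : categorize_checkstyle_errors_alt errors
      = [("code_structure_and_design", ((pvChecksFound errors).countP (fun c => (pvL 0).contains c) : Int)),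
         ("readability_and_conventions", ((pvChecksFound errors).countP (fun c => (pvL 1).contains c) : Int)),
         ("code_correctness", ((pvChecksFound errors).countP (fun c => (pvL 2).contains c) : Int)),
         ("maintainability", ((pvChecksFound errors).countP (fun c => (pvL 3).contains c) : Int)),
         ("general_setup", ((pvChecksFound errors).countP (fun c => (pvL 4).contains c) : Int)),
         ("all", (errors.length : Int))] := rfl
  rw [hA, pv_foldA_shape]
  simp only [pv_cnt_eq, zero_add]
  rw [hB]
  rfl
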